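-- pv_equiv track=rewrite | github.com/Jaano/npmp-cli | src/npmp_cli/ymlfilemanager.py | _escape_compose_interpolation
-- ===== SOURCE A (Python) =====
-- def _escape_compose_interpolation(value: str) -> str:
--     out: list[str] = []
--     i = 0
--     while i < len(value):
--         ch = value[i]
--         if ch != "$":
--             out.append(ch)
--             i += 1
--             continue
--         if i + 1 < len(value) and value[i + 1] == "$":
--             out.append("$$")
--             i += 2
--             continue
--         out.append("$$")
--         i += 1
--     return "".join(out)
-- ===== SOURCE B (Python) =====
-- def _escape_compose_interpolation(value: str) -> str:
--     out = []
--     i = 0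
--     n = len(value)
--     while i < n:
--         if value[i] != "$":
--             out.append(value[i])
--             i += 1
--         else:
--             j = i
--             while j < n and value[j] == "$":
--                 j += 1
--             k = j - i
--             out.append("$" * (2 * ((k + 1) // 2)))
--             i = j
--     return "".join(out)
-- ===== Notes on version B (the rewrite author's own statement) =====
-- stated objective: alternative
-- what changed: Replaces A's pairwise lookahead state machine (consuming '$' one or two at a time with an i+=2/i+=1 branch) by run-length aggregation: each maximal run of k '$' is replaced in one step by 2*ceil(k/2) '$' via a closed-form count.
import Mathlib
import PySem

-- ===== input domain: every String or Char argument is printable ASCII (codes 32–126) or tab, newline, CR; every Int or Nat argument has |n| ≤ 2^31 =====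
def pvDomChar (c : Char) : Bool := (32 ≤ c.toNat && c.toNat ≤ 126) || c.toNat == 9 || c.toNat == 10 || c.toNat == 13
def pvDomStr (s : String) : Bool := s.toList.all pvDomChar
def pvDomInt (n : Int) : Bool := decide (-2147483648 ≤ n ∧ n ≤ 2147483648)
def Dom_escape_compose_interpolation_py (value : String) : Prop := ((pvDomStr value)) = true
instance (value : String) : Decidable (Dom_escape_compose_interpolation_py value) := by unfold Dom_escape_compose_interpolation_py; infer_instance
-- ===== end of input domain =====

-- B replaces A's pairwise '$'-lookahead state machine by run-length aggregation
-- (each maximal run of k '$' becomes 2*((k+1)/2) '$' in one step); alternative, same cost.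


-- ===== PORT A =====
-- A's while loop over index i, transcribed as recursion on the remaining characters:
-- ch ≠ '$' copies one char; the 'i + 1 < len and value[i+1] == "$"' lookahead is
-- 'rest.head? = some '$''; the matching branch drops two chars, the else branch one.
def escA : List Char → List Char
  | [] => []
  | ch :: rest =>
    if ch ≠ '$' then ch :: escA rest
    else if rest.head? = some '$' then '$' :: '$' :: escA rest.tail
    else '$' :: '$' :: escA rest
termination_by l => l.length
decreasing_by
  all_goals simp [List.length_tail]

def escape_compose_interpolation_py (value : String) : String :=
  String.ofList (escA value.toList)

-- ===== PORT B =====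
-- Source B: copy non-'$' chars; at a '$', measure the maximal run length k and emit
-- 2*((k+1)/2) copies of '$', skipping the whole run.
def escB : List Char → List Char
  | [] => []
  | ch :: rest =>
    if ch = '$' then
      let k := 1 + (rest.takeWhile (· = '$')).length
      List.replicate (2 * ((k + 1) / 2)) '$' ++ escB (rest.dropWhile (· = '$'))
    else ch :: escB rest
termination_by l => l.length
decreasing_by
  · simp only [List.length_cons]
    exact Nat.lt_succ_of_le (List.length_dropWhile_le _ _)
  · simp

def escape_compose_interpolation_py_alt (value : String) : String :=
  String.ofList (escB value.toList)

-- ===== PRECONDITION & SPEC =====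
def Spec_escape_compose_interpolation_py (value : String) (out : String) : Prop := out = escape_compose_interpolation_py_alt value
instance (value : String) (out : String) : Decidable (Spec_escape_compose_interpolation_py value out) := by unfold Spec_escape_compose_interpolation_py; infer_instance

-- ===== CLAIM (what is proved, stated in full; the proofs are below) =====
def Claim_equal_escape_compose_interpolation_py : Prop := ∀ (value : String), Dom_escape_compose_interpolation_py value → Spec_escape_compose_interpolation_py value (escape_compose_interpolation_py value)

-- ===== LEMMAS AND PROOFS =====

theorem cons2_replicate (m : Nat) (x : List Char) :
    '$' :: '$' :: (List.replicate m '$' ++ x) = List.replicate m '$' ++ '$' :: '$' :: x := by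
  induction m with
  | zero => rfl
  | succ m ih => simp [List.replicate_succ] at ih ⊢; exact ih

-- Key lemma: at a '$', A's pairwise consumption of the whole maximal run ('$'::l has run
-- length 1 + (takeWhile run of l)) produces exactly B's closed-form 2*ceil(run/2) output.
theorem escA_run (n : Nat) : ∀ (l : List Char), l.length ≤ n →
    escA ('$' :: l) =
      List.replicate (2 * (((l.takeWhile (· = '$')).length + 2) / 2)) '$'
        ++ escA (l.dropWhile (· = '$')) := by
  induction n with
  | zero =>
    intro l hl
    have : l = [] := List.eq_nil_of_length_eq_zero (Nat.le_zero.mp hl)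
    subst this; simp [escA]
  | succ n ih =>
    intro l hl
    match l with
    | [] => simp [escA]
    | c :: l' =>
      by_cases hc : c = '$'
      · subst hc
        have h1 : escA ('$' :: '$' :: l') = '$' :: '$' :: escA l' := by
          simp [escA]
        match l' with
        | [] => simp [escA, h1, List.replicate]
        | d :: l'' =>
          by_cases hd : d = '$'
          · subst hd
            have ihl := ih l'' (by simp at hl; omega)
            rw [show escA ('$' :: '$' :: '$' :: l'') = '$' :: '$' :: escA ('$' :: l'') from by
                  simp [escA], ihl]
            have harith : ((('$' :: '$' :: l'').takeWhile (· = '$')).length + 2) / 2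
                = ((l''.takeWhile (· = '$')).length + 2) / 2 + 1 := by
              simp; omega
            have hdrop : (('$' :: '$' :: l'').dropWhile (· = '$')) = l''.dropWhile (· = '$') := by
              simp
            rw [harith, hdrop, Nat.mul_add, Nat.mul_one, List.replicate_add,
                List.append_assoc]
            exact cons2_replicate _ _
          · -- run of length exactly 2: A consumes both, B emits "$$"
            have ht : (('$' :: d :: l'').takeWhile (· = '$')) = ['$'] := by
              simp [hd]
            have hdp : (('$' :: d :: l'').dropWhile (· = '$')) = d :: l'' := by
              simp [hd]
            rw [show escA ('$' :: '$' :: d :: l'') = '$' :: '$' :: escA (d :: l'') from by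
                  simp [escA], ht, hdp]
            simp [List.replicate]
      · -- run of length exactly 1
        have h1 : escA ('$' :: c :: l') = '$' :: '$' :: escA (c :: l') := by
          simp [escA, hc]
        have ht : ((c :: l').takeWhile (· = '$')) = [] := by
          simp [hc]
        have hdp : ((c :: l').dropWhile (· = '$')) = c :: l' := by
          simp [hc]
        rw [h1, ht, hdp]
        simp [List.replicate]

theorem escA_eq_escB (n : Nat) : ∀ (l : List Char), l.length ≤ n → escA l = escB l := by
  induction n with
  | zero =>
    intro l hl
    have : l = [] := List.eq_nil_of_length_eq_zero (Nat.le_zero.mp hl)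
    subst this; simp [escA, escB]
  | succ n ih =>
    intro l hl
    match l with
    | [] => simp [escA, escB]
    | c :: l' =>
      by_cases hc : c = '$'
      · subst hc
        rw [escA_run l'.length l' le_rfl, escB]
        have hlen : (l'.dropWhile (· = '$')).length ≤ n := by
          have := List.length_dropWhile_le (· = '$') l'
          simp at hl; omega
        rw [ih _ hlen]
        congr 2
        omega
      · rw [show escA (c :: l') = c :: escA l' from by simp [escA, hc],
            show escB (c :: l') = c :: escB l' from by simp [escB, hc],
            ih l' (by simp at hl; omega)]

-- ===== VERDICT (by name: the statement is the Claim_ definition above) =====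
theorem escape_compose_interpolation_py_spec : Claim_equal_escape_compose_interpolation_py := by
  intro value _
  unfold Spec_escape_compose_interpolation_py escape_compose_interpolation_py escape_compose_interpolation_py_alt
  rw [escA_eq_escB value.toList.length _ le_rfl]
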